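-- pv_equiv track=rewrite | github.com/PratikGarai/Coding-Challenges | CodeForces/Misc/RockPaperScissors.py | min_wins
-- ===== SOURCE A (Python) =====
-- def min_wins(c,d):
--
--     def compute(arr):
--         a = c.copy()
--         b = d.copy()
--
--         for i in arr :
--             if i==0:
--                 m = min(a[0], b[2])
--                 a[0] -= m
--                 b[2] -= m
--             elif i==1:
--                 m = min(a[1], b[0])
--                 a[1] -= m
--                 b[0] -= m
--             elif i==2:
--                 m = min(a[2], b[1])
--                 a[2] -= m
--                 b[1] -= m
--             elif i==3:
--                 m = min(a[0], b[0])
--                 a[0] -= m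
--                 b[0] -= m
--             elif i==4:
--                 m = min(a[1], b[1])
--                 a[1] -= m
--                 b[1] -= m
--             elif i==5:
--                 m = min(a[2], b[2])
--                 a[2] -= m
--                 b[2] -= m
--         return sum(a)
--
--     def check_permute(ind, arr):
--         if ind==5:
--             return compute(arr)
--         m = 10000000000
--         for i in range(ind, 6):
--             m = min(m, check_permute(ind+1,arr[:ind]+arr[i:i+1]+arr[ind:i]+arr[i+1:6]))
--         return m
--     c = check_permute(0, [0,1,2,3,4,5])
--     return c
-- ===== SOURCE B (Python) =====
-- def min_wins(c, d):
--     # Iterative search: enumerate the 720 orderings with the classic next_permutation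
--     # odometer (no recursion, no list slicing) and run the six greedy cancellations
--     # table-driven instead of an if/elif chain; the running minimum starts at A's
--     # 10**10 sentinel, so the result is identical.
--     pairs = [(0, 2), (1, 0), (2, 1), (0, 0), (1, 1), (2, 2)]
--     perm = [0, 1, 2, 3, 4, 5]
--     best = 10000000000
--     while True:
--         a = c.copy()
--         b = d.copy()
--         for i in perm:
--             x, y = pairs[i]
--             m = min(a[x], b[y])
--             a[x] -= m
--             b[y] -= m
--         s = sum(a)
--         if s < best:
--             best = s
--         # advance perm to its lexicographic successor; done when perm is descending
--         k = 4
--         while k >= 0 and perm[k] >= perm[k + 1]: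
--             k -= 1
--         if k < 0:
--             return best
--         l = 5
--         while perm[l] <= perm[k]:
--             l -= 1
--         perm[k], perm[l] = perm[l], perm[k]
--         perm[k + 1:] = perm[k + 1:][::-1]
-- ===== Notes on version B (the rewrite author's own statement) =====
-- stated objective: alternative
-- what changed: Replaces A's recursive selection-with-slicing enumeration of the 720 orderings (min accumulated through the recursion, if/elif chain for the six greedy steps) by an iterative lexicographic next_permutation odometer with a table-driven cancellation loop and an explicit running minimum.
import Mathlib
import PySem

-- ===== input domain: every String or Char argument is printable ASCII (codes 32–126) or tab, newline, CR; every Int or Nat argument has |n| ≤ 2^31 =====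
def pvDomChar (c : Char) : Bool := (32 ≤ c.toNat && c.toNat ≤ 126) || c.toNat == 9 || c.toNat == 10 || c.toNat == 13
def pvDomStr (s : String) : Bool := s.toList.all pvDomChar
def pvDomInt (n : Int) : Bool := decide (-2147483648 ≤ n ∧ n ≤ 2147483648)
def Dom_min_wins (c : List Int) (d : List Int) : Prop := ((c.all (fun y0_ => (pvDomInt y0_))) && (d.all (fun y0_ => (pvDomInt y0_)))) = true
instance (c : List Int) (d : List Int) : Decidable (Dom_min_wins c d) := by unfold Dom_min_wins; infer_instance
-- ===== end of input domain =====

-- B enumerates the same 720 step orderings iteratively with a lexicographic next_permutation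
-- odometer and a table-driven cancellation loop, instead of A's recursive selection with slicing
-- and if/elif chain; same result (alternative decomposition, similar cost).


-- ===== PORT A =====
-- one step of A's inner loop: saturate the edge named by i (exact transliteration of the if/elif chain)
def computeStep (s : List Int × List Int) (i : Int) : List Int × List Int :=
  if i == 0 then
    let m := min (PySem.List.pyGetD s.1 0 0) (PySem.List.pyGetD s.2 2 0)
    (s.1.set 0 (PySem.List.pyGetD s.1 0 0 - m), s.2.set 2 (PySem.List.pyGetD s.2 2 0 - m))
  else if i == 1 then
    let m := min (PySem.List.pyGetD s.1 1 0) (PySem.List.pyGetD s.2 0 0)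
    (s.1.set 1 (PySem.List.pyGetD s.1 1 0 - m), s.2.set 0 (PySem.List.pyGetD s.2 0 0 - m))
  else if i == 2 then
    let m := min (PySem.List.pyGetD s.1 2 0) (PySem.List.pyGetD s.2 1 0)
    (s.1.set 2 (PySem.List.pyGetD s.1 2 0 - m), s.2.set 1 (PySem.List.pyGetD s.2 1 0 - m))
  else if i == 3 then
    let m := min (PySem.List.pyGetD s.1 0 0) (PySem.List.pyGetD s.2 0 0)
    (s.1.set 0 (PySem.List.pyGetD s.1 0 0 - m), s.2.set 0 (PySem.List.pyGetD s.2 0 0 - m))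
  else if i == 4 then
    let m := min (PySem.List.pyGetD s.1 1 0) (PySem.List.pyGetD s.2 1 0)
    (s.1.set 1 (PySem.List.pyGetD s.1 1 0 - m), s.2.set 1 (PySem.List.pyGetD s.2 1 0 - m))
  else if i == 5 then
    let m := min (PySem.List.pyGetD s.1 2 0) (PySem.List.pyGetD s.2 2 0)
    (s.1.set 2 (PySem.List.pyGetD s.1 2 0 - m), s.2.set 2 (PySem.List.pyGetD s.2 2 0 - m))
  else s

-- A's 'compute': copy c and d, apply the steps named by arr, return sum(a)
def compute (c d : List Int) (arr : List Int) : Int :=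
  (arr.foldl computeStep (c, d)).1.sum

-- A's 'check_permute'; fuel only makes the recursion total (min_wins always stops at ind == 5 first)
def checkPermute (c d : List Int) : Nat → Int → List Int → Int
  | 0, _, arr => compute c d arr
  | fuel + 1, ind, arr =>
    if ind == 5 then compute c d arr
    else
      (PySem.List.pyRange ind 6 1).foldl
        (fun m i => min m (checkPermute c d fuel (ind + 1)
          (PySem.List.slice arr none (some ind) ++ PySem.List.slice arr (some i) (some (i + 1)) ++
           PySem.List.slice arr (some ind) (some i) ++ PySem.List.slice arr (some (i + 1)) (some 6))))
        10000000000

def min_wins (c : List Int) (d : List Int) : Int :=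
  checkPermute c d 6 0 [0, 1, 2, 3, 4, 5]

-- ===== PORT B =====
-- Source B's edge table
def bPairs : List (Int × Int) := [(0, 2), (1, 0), (2, 1), (0, 0), (1, 1), (2, 2)]

-- one iteration of Source B's inner 'for i in perm' loop (pairs[i] lookup, cancel on both sides)
def bStep (s : List Int × List Int) (i : Int) : List Int × List Int :=
  let xy := PySem.List.pyGetD bPairs i (0, 0)
  let m := min (PySem.List.pyGetD s.1 xy.1 0) (PySem.List.pyGetD s.2 xy.2 0)
  (s.1.set xy.1.toNat (PySem.List.pyGetD s.1 xy.1 0 - m),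
   s.2.set xy.2.toNat (PySem.List.pyGetD s.2 xy.2 0 - m))

-- Source B's 'k = 4; while k >= 0 and perm[k] >= perm[k+1]: k -= 1' (fuel 5 covers all iterations)
def descendK (perm : List Int) : Int → Nat → Int
  | k, 0 => k
  | k, fuel + 1 =>
    if 0 ≤ k ∧ PySem.List.pyGetD perm (k + 1) 0 ≤ PySem.List.pyGetD perm k 0 then
      descendK perm (k - 1) fuel
    else k

-- Source B's 'l = 5; while perm[l] <= perm[k]: l -= 1' (fuel 6 covers all iterations)
def descendL (perm : List Int) (k : Int) : Int → Nat → Int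
  | l, 0 => l
  | l, fuel + 1 =>
    if PySem.List.pyGetD perm l 0 ≤ PySem.List.pyGetD perm k 0 then
      descendL perm k (l - 1) fuel
    else l

-- Source B's swap + reversal of the suffix ('perm[k+1:] = perm[k+1:][::-1]' ported as .reverse)
def nextPerm (perm : List Int) (k : Int) : List Int :=
  let l := descendL perm k 5 6
  let swapped := (perm.set k.toNat (PySem.List.pyGetD perm l 0)).set l.toNat
    (PySem.List.pyGetD perm k 0)
  PySem.List.slice swapped none (some (k + 1)) ++
    (PySem.List.slice swapped (some (k + 1)) none).reverse

-- Source B's 'while True' loop; fuel 720 only makes it total (the odometer stops at the last perm)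
def bLoop (c d : List Int) : Nat → List Int → Int → Int
  | 0, _, best => best
  | fuel + 1, perm, best =>
    let s := (perm.foldl bStep (c, d)).1.sum
    let best' := if s < best then s else best
    let k := descendK perm 4 5
    if k < 0 then best'
    else bLoop c d fuel (nextPerm perm k) best'

def min_wins_alt (c : List Int) (d : List Int) : Int :=
  bLoop c d 720 [0, 1, 2, 3, 4, 5] 10000000000

-- ===== PRECONDITION & SPEC =====
-- Pre_ excludes exactly the inputs on which the Python A raises IndexError: a list with
-- fewer than three elements on either side.
def Pre_min_wins (c : List Int) (d : List Int) : Prop :=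
  3 ≤ c.length ∧ 3 ≤ d.length
instance (c : List Int) (d : List Int) : Decidable (Pre_min_wins c d) := by
  unfold Pre_min_wins; infer_instance

def pvWitness_min_wins : List Int × List Int := ([1, 2, 3], [3, 2, 1])

def Spec_min_wins (c : List Int) (d : List Int) (out : Int) : Prop :=
  out = min_wins_alt c d
instance (c : List Int) (d : List Int) (out : Int) : Decidable (Spec_min_wins c d out) := by
  unfold Spec_min_wins; infer_instance

-- ===== CLAIM (what is proved, stated in full; the proofs are below) =====
def Claim_equal_min_wins : Prop := ∀ (c : List Int) (d : List Int), Dom_min_wins c d → Pre_min_wins c d → Spec_min_wins c d (min_wins c d)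

-- ===== LEMMAS AND PROOFS =====

-- proof-side mirror of A's recursion: the list of leaf permutations check_permute visits
def permsA : Nat → Int → List Int → List (List Int)
  | 0, _, arr => [arr]
  | fuel + 1, ind, arr =>
    if ind == 5 then [arr]
    else
      (PySem.List.pyRange ind 6 1).flatMap (fun i =>
        permsA fuel (ind + 1)
          (PySem.List.slice arr none (some ind) ++ PySem.List.slice arr (some i) (some (i + 1)) ++
           PySem.List.slice arr (some ind) (some i) ++ PySem.List.slice arr (some (i + 1)) (some 6)))

-- proof-side mirror of B's loop: the list of permutations the odometer visits
def chainB : Nat → List Int → List (List Int)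
  | 0, _ => []
  | fuel + 1, perm =>
    let k := descendK perm 4 5
    if k < 0 then [perm] else perm :: chainB fuel (nextPerm perm k)

-- fold-min with a min'ed seed splits off the left component
lemma foldMin_min {α : Type} (F : α → Int) (ys : List α) :
    ∀ m n : Int, ys.foldl (fun acc p => min acc (F p)) (min m n) =
      min m (ys.foldl (fun acc p => min acc (F p)) n) := by
  induction ys with
  | nil => intro m n; simp
  | cons y ys ih =>
    intro m n
    simp only [List.foldl_cons, min_assoc]
    exact ih m (min n (F y))

lemma foldMin_le_init {α : Type} (F : α → Int) :
    ∀ (l : List α) (m : Int), l.foldl (fun acc p => min acc (F p)) m ≤ m := by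
  intro l
  induction l with
  | nil => intro m; simp
  | cons y l ih => intro m; exact le_trans (ih _) (min_le_left _ _)

-- A's recursion flattened: min'ing m with a subtree equals fold-min of m over its leaves
lemma checkPermute_flatten (c d : List Int) :
    ∀ (fuel : Nat) (ind : Int) (arr : List Int) (m : Int), m ≤ 10000000000 →
      min m (checkPermute c d fuel ind arr) =
        (permsA fuel ind arr).foldl (fun acc p => min acc (compute c d p)) m := by
  intro fuel
  induction fuel with
  | zero => intro ind arr m _; simp [checkPermute, permsA]
  | succ n ih =>
    intro ind arr m hm
    by_cases h5 : (ind == 5) = true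
    · simp [checkPermute, permsA, h5]
    · have helper : ∀ (L : List Int) (m : Int), m ≤ 10000000000 →
          L.foldl (fun acc i => min acc (checkPermute c d n (ind + 1)
            (PySem.List.slice arr none (some ind) ++ PySem.List.slice arr (some i) (some (i + 1)) ++
             PySem.List.slice arr (some ind) (some i) ++ PySem.List.slice arr (some (i + 1)) (some 6)))) m =
          (L.flatMap (fun i => permsA n (ind + 1)
            (PySem.List.slice arr none (some ind) ++ PySem.List.slice arr (some i) (some (i + 1)) ++
             PySem.List.slice arr (some ind) (some i) ++ PySem.List.slice arr (some (i + 1)) (some 6)))).foldl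
            (fun acc p => min acc (compute c d p)) m := by
        intro L
        induction L with
        | nil => intro m _; simp
        | cons i L ihL =>
          intro m hm
          simp only [List.foldl_cons, List.flatMap_cons, List.foldl_append]
          rw [ih (ind + 1) _ m hm]
          exact ihL _ (le_trans (foldMin_le_init _ _ _) hm)
      simp only [checkPermute, permsA, h5, Bool.false_eq_true, if_false]
      rw [helper _ 10000000000 (le_refl _), ← foldMin_min,
        min_eq_left hm]

-- B's loop flattened: fold-min of best over the odometer's visit list
lemma bLoop_flatten (c d : List Int) :
    ∀ (fuel : Nat) (perm : List Int) (best : Int),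
      bLoop c d fuel perm best =
        (chainB fuel perm).foldl (fun acc p => min acc ((p.foldl bStep (c, d)).1.sum)) best := by
  intro fuel
  induction fuel with
  | zero => intro perm best; simp [bLoop, chainB]
  | succ n ih =>
    intro perm best
    simp only [bLoop, chainB]
    have hbest : (if (perm.foldl bStep (c, d)).1.sum < best then (perm.foldl bStep (c, d)).1.sum
        else best) = min best ((perm.foldl bStep (c, d)).1.sum) := by
      rcases lt_or_ge ((perm.foldl bStep (c, d)).1.sum) best with h | h
      · rw [if_pos h, min_eq_right (le_of_lt h)]
      · rw [if_neg (not_lt.mpr h), min_eq_left h]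
    by_cases hk : descendK perm 4 5 < 0
    · simp only [hk, if_pos, List.foldl_cons, List.foldl_nil, hbest]
    · simp only [hk, if_false, ih, List.foldl_cons, hbest]

-- the two mirrors produce the same concrete list of 720 permutations
set_option maxRecDepth 10000 in
lemma permsA_eq_chainB : permsA 6 0 [0, 1, 2, 3, 4, 5] = chainB 720 [0, 1, 2, 3, 4, 5] := by
  decide

-- every entry of every visited permutation is one of 0..5
set_option maxRecDepth 10000 in
lemma chainB_entries : (chainB 720 [0, 1, 2, 3, 4, 5]).all
    (fun p => p.all (fun i => decide (0 ≤ i) && decide (i < 6))) = true := by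
  decide

-- the table-driven step agrees with the if/elif chain on step names 0..5
lemma bStep_eq_computeStep (s : List Int × List Int) (i : Int) (h0 : 0 ≤ i) (h6 : i < 6) :
    bStep s i = computeStep s i := by
  interval_cases i <;>
    simp [bStep, computeStep, bPairs, PySem.List.pyGetD, PySem.List.pyGet?, PySem.List.pyIdx?]

-- hence both greedy folds agree on any in-range permutation
lemma greedy_eq :
    ∀ (p : List Int), (∀ i ∈ p, 0 ≤ i ∧ i < 6) →
      ∀ s : List Int × List Int, p.foldl bStep s = p.foldl computeStep s := by
  intro p
  induction p with
  | nil => intro _ s; rfl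
  | cons i p ih =>
    intro h s
    simp only [List.foldl_cons]
    rw [bStep_eq_computeStep s i (h i (by simp)).1 (h i (by simp)).2]
    exact ih (fun j hj => h j (by simp [hj])) _

-- fold-min respects pointwise-equal summands over the list's members
lemma foldMin_congr (F G : List Int → Int) :
    ∀ (L : List (List Int)) (m : Int), (∀ p ∈ L, F p = G p) →
      L.foldl (fun acc p => min acc (F p)) m = L.foldl (fun acc p => min acc (G p)) m := by
  intro L
  induction L with
  | nil => intro m _; rfl
  | cons p L ih =>
    intro m h
    simp only [List.foldl_cons, h p (by simp)]
    exact ih _ (fun q hq => h q (by simp [hq]))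

-- A's top-level value never exceeds the 10**10 seed
lemma min_wins_le_cap (c d : List Int) : min_wins c d ≤ 10000000000 := by
  unfold min_wins
  simp only [checkPermute]
  rw [if_neg (by decide)]
  exact foldMin_le_init _ _ _

-- ===== VERDICT (by name: the statement is the Claim_ definition above) =====
theorem min_wins_spec : Claim_equal_min_wins := by
  intro c d _hdom _hpre
  show min_wins c d = min_wins_alt c d
  have hA : min_wins c d =
      (permsA 6 0 [0, 1, 2, 3, 4, 5]).foldl (fun acc p => min acc (compute c d p)) 10000000000 := by
    rw [← checkPermute_flatten c d 6 0 [0, 1, 2, 3, 4, 5] 10000000000 (le_refl _)]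
    exact (min_eq_right (min_wins_le_cap c d)).symm
  have hB : min_wins_alt c d =
      (chainB 720 [0, 1, 2, 3, 4, 5]).foldl
        (fun acc p => min acc ((p.foldl bStep (c, d)).1.sum)) 10000000000 :=
    bLoop_flatten c d 720 [0, 1, 2, 3, 4, 5] 10000000000
  rw [hA, hB, permsA_eq_chainB]
  apply foldMin_congr
  intro p hp
  have hall := chainB_entries
  rw [List.all_eq_true] at hall
  have hp' := hall p hp
  rw [List.all_eq_true] at hp'
  have hin : ∀ i ∈ p, 0 ≤ i ∧ i < 6 := by
    intro i hi
    have := hp' i hi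
    simp only [Bool.and_eq_true, decide_eq_true_eq] at this
    exact this
  unfold compute
  rw [greedy_eq p hin (c, d)]
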